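-- pv_equiv track=rewrite | github.com/mshapiro42/CVFinal | keyGet.py | keyGet
-- ===== SOURCE A (Python) =====
-- def keyGet(clef,nsharps,nflats):
--     if clef == 'treble' or 'Treble':
--         trebCKey = [1, 3, 4, 6, 8, 10, 11, 13, 15, 16, 18]
--         trebSharpChanges = {
--             7: [0, 1, 2, 3, 4, 5, 6, 7, 8, 9, 10],
--             6: [0, 1, 2, 3, 4, 6, 7, 8, 9, 10],
--             5: [0, 2, 3, 4, 6, 7, 9, 10],
--             4: [0, 2, 3, 6, 7, 9, 10],
--             3: [2, 3, 6, 9, 10],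
--             2: [2, 6, 9],
--             1: [2, 9]}
--         trebFlatChanges = {
--             7: [0, 1, 2, 3, 4, 5, 6, 7, 8, 9, 10],
--             6: [0, 1, 3, 4, 5, 6, 7, 8, 10],
--             5: [0, 1, 3, 4, 5, 7, 8, 10],
--             4: [0, 1, 4, 5, 7, 8],
--             3: [1, 4, 5, 8],
--             2: [1, 5, 8],
--             1: [5]
--         }
--         key = trebCKey
--         if nsharps != 0:
--             changes = trebSharpChanges[nsharps]
--             for idx in changes:
--                 key[idx] += 1
--             return key
--         elif nflats != 0:
--             changes = trebFlatChanges[nflats]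
--             for idx in changes:
--                 key[idx] -= 1
--             return key
--         else:
--             return key
--     elif clef == 'bass' or 'Bass':
--         bassCKey = [1, 3, 5, 7, 8, 10, 12, 13, 15, 17, 19]
--         bassSharpChanges = {
--             7: [0, 1, 2, 3, 4, 5, 6, 7, 8, 9, 10],
--             6: [0, 1, 2, 4, 5, 6, 7, 8, 9],
--             5: [0, 1, 2, 4, 5, 7, 8, 9],
--             4: [0, 1, 4, 5, 7, 8],
--             3: [0, 1, 4, 7, 8],
--             2: [0, 4, 7],
--             1: [0, 7]
--         }
--         bassFlatChanges = {
--             7: [0, 1, 2, 3, 4, 5, 6, 7, 8, 9, 10],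
--             6: [1, 2, 3, 4, 5, 6, 8, 9, 10],
--             5: [1, 2, 3, 5, 6, 8, 9, 10],
--             4: [2, 3, 5, 6, 9, 10],
--             3: [2, 3, 6, 9, 10],
--             2: [3, 6, 10],
--             1: [3, 6]
--         }
--         key = bassCKey
--         if nsharps != 0:
--             changes = bassSharpChanges[nsharps]
--             for idx in changes:
--                 key[idx] += 1
--             return key
--         elif nflats != 0:
--             changes = bassFlatChanges[nflats]
--             for idx in changes:
--                 key[idx] -= 1
--             return key
--         else:
--             return key
-- ===== SOURCE B (Python) =====
-- # Precomputed final key tables; A's clef test is always truthy, so treble tables apply to every call.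
-- _BASE = [1, 3, 4, 6, 8, 10, 11, 13, 15, 16, 18]
-- _SHARP = {
--     1: [1, 3, 5, 6, 8, 10, 11, 13, 15, 17, 18],
--     2: [1, 3, 5, 6, 8, 10, 12, 13, 15, 17, 18],
--     3: [1, 3, 5, 7, 8, 10, 12, 13, 15, 17, 19],
--     4: [2, 3, 5, 7, 8, 10, 12, 14, 15, 17, 19],
--     5: [2, 3, 5, 7, 9, 10, 12, 14, 15, 17, 19],
--     6: [2, 4, 5, 7, 9, 10, 12, 14, 16, 17, 19],
--     7: [2, 4, 5, 7, 9, 11, 12, 14, 16, 17, 19],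
-- }
-- _FLAT = {
--     1: [1, 3, 4, 6, 8, 9, 11, 13, 15, 16, 18],
--     2: [1, 2, 4, 6, 8, 9, 11, 13, 14, 16, 18],
--     3: [1, 2, 4, 6, 7, 9, 11, 13, 14, 16, 18],
--     4: [0, 2, 4, 6, 7, 9, 11, 12, 14, 16, 18],
--     5: [0, 2, 4, 5, 7, 9, 11, 12, 14, 16, 17],
--     6: [0, 2, 4, 5, 7, 9, 10, 12, 14, 16, 17],
--     7: [0, 2, 3, 5, 7, 9, 10, 12, 14, 15, 17],
-- }
--
-- def keyGet(clef, nsharps, nflats):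
--     if nsharps != 0:
--         return list(_SHARP[nsharps])
--     elif nflats != 0:
--         return list(_FLAT[nflats])
--     return list(_BASE)
-- ===== Notes on version B (the rewrite author's own statement) =====
-- stated objective: simpler
-- what changed: Replaces the base-array-plus-delta-loop (and the dead bass branch behind A's always-true clef test) with a direct lookup of precomputed final key tables.
import Mathlib
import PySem

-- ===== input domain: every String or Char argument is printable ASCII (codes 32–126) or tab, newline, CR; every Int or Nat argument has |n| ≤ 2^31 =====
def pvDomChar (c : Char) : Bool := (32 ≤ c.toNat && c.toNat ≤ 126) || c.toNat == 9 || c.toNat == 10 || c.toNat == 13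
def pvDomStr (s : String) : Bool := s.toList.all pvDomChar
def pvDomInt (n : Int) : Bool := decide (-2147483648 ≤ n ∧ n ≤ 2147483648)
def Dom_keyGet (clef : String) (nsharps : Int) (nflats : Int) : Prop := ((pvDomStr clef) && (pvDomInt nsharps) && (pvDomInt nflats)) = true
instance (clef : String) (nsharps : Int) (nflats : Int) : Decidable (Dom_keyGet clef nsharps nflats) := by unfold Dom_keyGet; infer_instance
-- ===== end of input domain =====

-- B replaces A's base-array-plus-delta-loop (and A's dead bass branch behind its always-true
-- clef test) with a direct lookup of precomputed final key tables; objective: simpler.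

-- ===== PORT A =====
-- 'for idx in changes: key[idx] += d' — in-place bump at each listed index
def pvBump (key : List Int) (changes : List Int) (d : Int) : List Int :=
  changes.foldl (fun k idx => k.set idx.toNat ((k.getD idx.toNat 0) + d)) key

def keyGet (clef : String) (nsharps : Int) (nflats : Int) : List Int :=
  -- Python: 'if clef == "treble" or "Treble"' — the literal 'Treble' is truthy, so '|| true'
  if (clef == "treble") || true then
    let trebCKey : List Int := [1, 3, 4, 6, 8, 10, 11, 13, 15, 16, 18]
    let trebSharpChanges : PySem.Dict Int (List Int) := PySem.Dict.ofList
      [(7, [0,1,2,3,4,5,6,7,8,9,10]), (6, [0,1,2,3,4,6,7,8,9,10]), (5, [0,2,3,4,6,7,9,10]),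
       (4, [0,2,3,6,7,9,10]), (3, [2,3,6,9,10]), (2, [2,6,9]), (1, [2,9])]
    let trebFlatChanges : PySem.Dict Int (List Int) := PySem.Dict.ofList
      [(7, [0,1,2,3,4,5,6,7,8,9,10]), (6, [0,1,3,4,5,6,7,8,10]), (5, [0,1,3,4,5,7,8,10]),
       (4, [0,1,4,5,7,8]), (3, [1,4,5,8]), (2, [1,5,8]), (1, [5])]
    if nsharps != 0 then
      match PySem.Dict.get? trebSharpChanges nsharps with
      | some changes => pvBump trebCKey changes 1
      | none => []  -- KeyError; excluded by Pre_keyGet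
    else if nflats != 0 then
      match PySem.Dict.get? trebFlatChanges nflats with
      | some changes => pvBump trebCKey changes (-1)
      | none => []  -- KeyError; excluded by Pre_keyGet
    else
      trebCKey
  else
    -- dead code in Python (first condition is always truthy); transliterated anyway
    if (clef == "bass") || true then
      let bassCKey : List Int := [1, 3, 5, 7, 8, 10, 12, 13, 15, 17, 19]
      let bassSharpChanges : PySem.Dict Int (List Int) := PySem.Dict.ofList
        [(7, [0,1,2,3,4,5,6,7,8,9,10]), (6, [0,1,2,4,5,6,7,8,9]), (5, [0,1,2,4,5,7,8,9]),
         (4, [0,1,4,5,7,8]), (3, [0,1,4,7,8]), (2, [0,4,7]), (1, [0,7])]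
      let bassFlatChanges : PySem.Dict Int (List Int) := PySem.Dict.ofList
        [(7, [0,1,2,3,4,5,6,7,8,9,10]), (6, [1,2,3,4,5,6,8,9,10]), (5, [1,2,3,5,6,8,9,10]),
         (4, [2,3,5,6,9,10]), (3, [2,3,6,9,10]), (2, [3,6,10]), (1, [3,6])]
      if nsharps != 0 then
        match PySem.Dict.get? bassSharpChanges nsharps with
        | some changes => pvBump bassCKey changes 1
        | none => []
      else if nflats != 0 then
        match PySem.Dict.get? bassFlatChanges nflats with
        | some changes => pvBump bassCKey changes (-1)
        | none => []
      else
        bassCKey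
    else
      []  -- unreachable (Python would fall through returning None)

-- ===== PORT B =====
def pvBase : List Int := [1, 3, 4, 6, 8, 10, 11, 13, 15, 16, 18]
def pvSharpTbl : PySem.Dict Int (List Int) := PySem.Dict.ofList
  [(1, [1, 3, 5, 6, 8, 10, 11, 13, 15, 17, 18]),
   (2, [1, 3, 5, 6, 8, 10, 12, 13, 15, 17, 18]),
   (3, [1, 3, 5, 7, 8, 10, 12, 13, 15, 17, 19]),
   (4, [2, 3, 5, 7, 8, 10, 12, 14, 15, 17, 19]),
   (5, [2, 3, 5, 7, 9, 10, 12, 14, 15, 17, 19]),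
   (6, [2, 4, 5, 7, 9, 10, 12, 14, 16, 17, 19]),
   (7, [2, 4, 5, 7, 9, 11, 12, 14, 16, 17, 19])]
def pvFlatTbl : PySem.Dict Int (List Int) := PySem.Dict.ofList
  [(1, [1, 3, 4, 6, 8, 9, 11, 13, 15, 16, 18]),
   (2, [1, 2, 4, 6, 8, 9, 11, 13, 14, 16, 18]),
   (3, [1, 2, 4, 6, 7, 9, 11, 13, 14, 16, 18]),
   (4, [0, 2, 4, 6, 7, 9, 11, 12, 14, 16, 18]),
   (5, [0, 2, 4, 5, 7, 9, 11, 12, 14, 16, 17]),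
   (6, [0, 2, 4, 5, 7, 9, 10, 12, 14, 16, 17]),
   (7, [0, 2, 3, 5, 7, 9, 10, 12, 14, 15, 17])]

def keyGet_alt (clef : String) (nsharps : Int) (nflats : Int) : List Int :=
  if nsharps != 0 then
    match PySem.Dict.get? pvSharpTbl nsharps with
    | some k => k
    | none => []  -- KeyError; excluded by Pre_keyGet
  else if nflats != 0 then
    match PySem.Dict.get? pvFlatTbl nflats with
    | some k => k
    | none => []  -- KeyError; excluded by Pre_keyGet
  else
    pvBase

-- ===== PRECONDITION & SPEC =====
-- A raises KeyError when nsharps ≠ 0 lies outside 1..7, or nsharps = 0 and nflats ≠ 0 lies outside 1..7.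
def Pre_keyGet (clef : String) (nsharps : Int) (nflats : Int) : Prop :=
  (nsharps ≠ 0 → 1 ≤ nsharps ∧ nsharps ≤ 7) ∧
  (nsharps = 0 → nflats ≠ 0 → 1 ≤ nflats ∧ nflats ≤ 7)
instance (clef : String) (nsharps : Int) (nflats : Int) : Decidable (Pre_keyGet clef nsharps nflats) := by unfold Pre_keyGet; infer_instance
def pvWitness_keyGet : String × Int × Int := ("treble", 3, 0)

def Spec_keyGet (clef : String) (nsharps : Int) (nflats : Int) (out : List Int) : Prop := out = keyGet_alt clef nsharps nflats
instance (clef : String) (nsharps : Int) (nflats : Int) (out : List Int) : Decidable (Spec_keyGet clef nsharps nflats out) := by unfold Spec_keyGet; infer_instance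

-- ===== CLAIM (what is proved, stated in full; the proofs are below) =====
def Claim_equal_keyGet : Prop := ∀ (clef : String) (nsharps : Int) (nflats : Int), Dom_keyGet clef nsharps nflats → Pre_keyGet clef nsharps nflats → Spec_keyGet clef nsharps nflats (keyGet clef nsharps nflats)

-- ===== LEMMAS AND PROOFS =====
theorem keyGet_eq_alt (clef : String) (nsharps : Int) (nflats : Int)
    (hs : nsharps ≠ 0 → 1 ≤ nsharps ∧ nsharps ≤ 7)
    (hf : nsharps = 0 → nflats ≠ 0 → 1 ≤ nflats ∧ nflats ≤ 7) :
    keyGet clef nsharps nflats = keyGet_alt clef nsharps nflats := by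
  by_cases h : nsharps = 0
  · subst h
    by_cases h2 : nflats = 0
    · subst h2; simp [keyGet, keyGet_alt]; decide
    · obtain ⟨l, u⟩ := hf rfl h2
      interval_cases nflats <;> simp [keyGet, keyGet_alt] <;> decide
  · obtain ⟨l, u⟩ := hs h
    interval_cases nsharps <;> simp [keyGet, keyGet_alt] <;> decide

-- ===== VERDICT (by name: the statement is the Claim_ definition above) =====
theorem keyGet_spec : Claim_equal_keyGet := by
  intro clef nsharps nflats _ hpre
  exact keyGet_eq_alt clef nsharps nflats hpre.1 hpre.2
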